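-- pv_equiv track=rewrite | github.com/Hashual/Vigenere | Chiffrement Vigenère.py | compteDiviseurOccurence
-- ===== SOURCE A (Python) =====
-- def compteDiviseurOccurence(listeRepet: list[int]) -> dict[int, int]:
--     contacts : dict[int, int] = {}
--
--     for nombre in listeRepet:
--         for diviseur in range(2, nombre // 2 + 1):
--             if nombre % diviseur == 0:
--                 if diviseur not in contacts:
--                     contacts[diviseur] = 1
--                 else:
--                     contacts[diviseur] += 1
--
--     return contacts
-- ===== SOURCE B (Python) =====
-- def _diviseurs(n):
--     # divisors of n in [2, n//2], enumerated via sqrt factor pairs, in increasing order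
--     half = n // 2
--     found = set()
--     i = 1
--     while i * i <= n:
--         if n % i == 0:
--             for d in (i, n // i):
--                 if 2 <= d <= half:
--                     found.add(d)
--         i += 1
--     return sorted(found)
--
--
-- def compteDiviseurOccurence(listeRepet: list[int]) -> dict[int, int]:
--     contacts: dict[int, int] = {}
--     for nombre in listeRepet:
--         for diviseur in _diviseurs(nombre):
--             contacts[diviseur] = contacts.get(diviseur, 0) + 1
--     return contacts
-- ===== Notes on version B (the rewrite author's own statement) =====
-- stated objective: faster
-- what changed: Per number, divisors in [2, n//2] are enumerated via sqrt(n) factor pairs collected in a set and sorted, instead of trial-dividing by every candidate up to n//2; the dict update becomes a single get-based increment.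
import Mathlib
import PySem

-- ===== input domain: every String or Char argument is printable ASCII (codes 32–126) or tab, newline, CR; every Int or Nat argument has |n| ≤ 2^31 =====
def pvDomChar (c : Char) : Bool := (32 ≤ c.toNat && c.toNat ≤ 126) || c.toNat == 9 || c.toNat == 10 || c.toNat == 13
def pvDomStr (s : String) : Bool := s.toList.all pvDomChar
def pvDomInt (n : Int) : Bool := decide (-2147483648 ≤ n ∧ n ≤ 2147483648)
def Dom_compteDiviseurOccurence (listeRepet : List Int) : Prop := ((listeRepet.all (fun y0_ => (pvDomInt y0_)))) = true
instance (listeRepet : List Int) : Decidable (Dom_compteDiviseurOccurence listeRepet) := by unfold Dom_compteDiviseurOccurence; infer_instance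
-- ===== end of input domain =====

-- B enumerates each number's divisors in [2, n//2] via factor pairs i, n//i with i*i <= n (set + sort)
-- instead of trial-dividing by every candidate up to n//2; objective: faster (measured).


-- ===== PORT A =====
def compteDiviseurOccurence (listeRepet : List Int) : List (Int × Int) :=
  (listeRepet.foldl (fun contacts nombre =>
      (PySem.List.pyRange 2 (PySem.Int.floordiv nombre 2 + 1) 1).foldl
        (fun contacts diviseur =>
          if PySem.Int.mod nombre diviseur = 0 then
            if contacts.contains diviseur = false then
              contacts.insert diviseur 1
            else
              contacts.insert diviseur (contacts.getD diviseur 0 + 1)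
          else contacts)
        contacts)
    (PySem.Dict.empty : PySem.Dict Int Int)).items

-- ===== PORT B =====
-- the 'while i * i <= n' loop of Source B's _diviseurs; the 1 ≤ i argument is only for termination
def pvDivLoop (n half : Int) (i : Int) (found : PySem.Set Int) (hi : 1 ≤ i) : PySem.Set Int :=
  if h : i * i ≤ n then
    pvDivLoop n half (i + 1)
      (if PySem.Int.mod n i = 0 then
         (fun s => if 2 ≤ PySem.Int.floordiv n i ∧ PySem.Int.floordiv n i ≤ half then
                     PySem.Set.add s (PySem.Int.floordiv n i) else s)
           (if 2 ≤ i ∧ i ≤ half then PySem.Set.add found i else found)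
       else found)
      (by omega)
  else found
termination_by (n + 1 - i * i).toNat
decreasing_by
  have h2 : (i + 1) * (i + 1) = i * i + 2 * i + 1 := by ring
  omega

-- Source B's _diviseurs(n): sorted(found)
def pvDiviseurs (n : Int) : List Int :=
  PySem.List.sorted (pvDivLoop n (PySem.Int.floordiv n 2) 1 PySem.Set.empty (by omega))
    (fun x => x) false

def compteDiviseurOccurence_alt (listeRepet : List Int) : List (Int × Int) :=
  (listeRepet.foldl (fun contacts nombre =>
      (pvDiviseurs nombre).foldl
        (fun contacts diviseur => contacts.insert diviseur (contacts.getD diviseur 0 + 1))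
        contacts)
    (PySem.Dict.empty : PySem.Dict Int Int)).items

-- ===== PRECONDITION & SPEC =====
def Spec_compteDiviseurOccurence (listeRepet : List Int) (out : List (Int × Int)) : Prop := out = compteDiviseurOccurence_alt listeRepet
instance (listeRepet : List Int) (out : List (Int × Int)) : Decidable (Spec_compteDiviseurOccurence listeRepet out) := by unfold Spec_compteDiviseurOccurence; infer_instance

-- ===== CLAIM (what is proved, stated in full; the proofs are below) =====
def Claim_equal_compteDiviseurOccurence : Prop := ∀ (listeRepet : List Int), Dom_compteDiviseurOccurence listeRepet → Spec_compteDiviseurOccurence listeRepet (compteDiviseurOccurence listeRepet)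

-- ===== LEMMAS AND PROOFS =====

-- membership in the while-loop's set: d came from a factor pair (j, n//j) with j*j ≤ n, filtered to [2, half]
theorem pvDivLoop_mem (n half : Int) (d : Int) :
    ∀ (i : Int) (found : PySem.Set Int) (hi : 1 ≤ i),
      d ∈ pvDivLoop n half i found hi ↔
        d ∈ found ∨ ∃ j : Int, i ≤ j ∧ j * j ≤ n ∧ PySem.Int.mod n j = 0 ∧
          (d = j ∨ d = PySem.Int.floordiv n j) ∧ 2 ≤ d ∧ d ≤ half := by
  intro i found hi
  fun_induction pvDivLoop n half i found hi with
  | case1 i found hi h ih =>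
    simp only [dite_eq_ite] at ih
    rw [ih]
    constructor
    · rintro (hf | ⟨j, hj⟩)
      · by_cases hm : PySem.Int.mod n i = 0
        · rw [if_pos hm] at hf
          have key : d ∈ found ∨ d = i ∧ (2 ≤ i ∧ i ≤ half) ∨
              d = PySem.Int.floordiv n i ∧
                (2 ≤ PySem.Int.floordiv n i ∧ PySem.Int.floordiv n i ≤ half) := by
            split_ifs at hf <;> (try simp only [PySem.Set.mem_add] at hf) <;> tauto
          rcases key with hf' | ⟨hd, hb⟩ | ⟨hd, hb⟩
          · exact Or.inl hf'
          · exact Or.inr ⟨i, le_refl i, h, hm, Or.inl hd, by omega, by omega⟩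
          · exact Or.inr ⟨i, le_refl i, h, hm, Or.inr hd, by omega, by omega⟩
        · rw [if_neg hm] at hf
          exact Or.inl hf
      · exact Or.inr ⟨j, by omega, hj.2.1, hj.2.2.1, hj.2.2.2.1, hj.2.2.2.2⟩
    · rintro (hf | ⟨j, hj1, hj2, hj3, hj4, hj5, hj6⟩)
      · left
        split_ifs <;> try simp only [PySem.Set.mem_add]
        all_goals tauto
      · by_cases hji : j = i
        · subst hji
          left
          rw [if_pos hj3]
          rcases hj4 with hd | hd <;> subst hd <;>
            (split_ifs <;> (try simp only [PySem.Set.mem_add]) <;> tauto)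
        · exact Or.inr ⟨j, by omega, hj2, hj3, hj4, hj5, hj6⟩
  | case2 i found hi h =>
    simp only [iff_self_or]
    rintro ⟨j, hj1, hj2, _⟩
    have : i * i ≤ j * j := by nlinarith
    omega

theorem pvDivLoop_nodup (n half : Int) :
    ∀ (i : Int) (found : PySem.Set Int) (hi : 1 ≤ i),
      found.Nodup → (pvDivLoop n half i found hi).Nodup := by
  intro i found hi
  fun_induction pvDivLoop n half i found hi with
  | case1 i found hi h ih =>
    intro hnd
    apply ih
    split_ifs
    all_goals first
      | exact hnd
      | (apply PySem.Set.nodup_add; exact hnd)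
      | (apply PySem.Set.nodup_add; apply PySem.Set.nodup_add; exact hnd)
  | case2 i found hi h => exact id

-- arithmetic heart: d is produced by the factor-pair scan iff 2 ≤ d ≤ n//2 and d divides n
theorem pvChar (n d : Int) :
    (∃ j : Int, 1 ≤ j ∧ j * j ≤ n ∧ PySem.Int.mod n j = 0 ∧
        (d = j ∨ d = PySem.Int.floordiv n j) ∧ 2 ≤ d ∧ d ≤ PySem.Int.floordiv n 2) ↔
      (2 ≤ d ∧ d ≤ PySem.Int.floordiv n 2 ∧ PySem.Int.mod n d = 0) := by
  constructor
  · rintro ⟨j, hj1, hj2, hm, hd, h2, hh⟩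
    refine ⟨h2, hh, ?_⟩
    rw [PySem.Int.mod_eq_zero_iff_dvd] at hm ⊢
    rcases hd with rfl | rfl
    · exact hm
    · obtain ⟨k, hk⟩ := hm
      have hj0 : j ≠ 0 := by omega
      rw [PySem.Int.floordiv_eq_ediv_of_pos (by omega), hk,
        Int.mul_ediv_cancel_left _ hj0]
      exact ⟨j, mul_comm j k⟩
  · rintro ⟨h2, hh, hm⟩
    have hdvd := (PySem.Int.mod_eq_zero_iff_dvd n d).mp hm
    have hd2 : d * 2 ≤ n := (PySem.Int.le_floordiv_iff_mul_le (by omega)).mp hh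
    obtain ⟨e, he⟩ := hdvd
    have he2 : 2 ≤ e := by nlinarith
    by_cases hc : d * d ≤ n
    · exact ⟨d, by omega, hc, hm, Or.inl rfl, h2, hh⟩
    · refine ⟨e, by omega, by nlinarith, ?_, Or.inr ?_, h2, hh⟩
      · rw [PySem.Int.mod_eq_zero_iff_dvd]
        exact ⟨d, by rw [he]; ring⟩
      · rw [PySem.Int.floordiv_eq_ediv_of_pos (by omega), he, mul_comm,
          Int.mul_ediv_cancel_left _ (show e ≠ 0 by omega)]

-- the per-number divisor lists coincide: B's sorted pair-scan = A's filtered trial range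
theorem pvDiviseurs_eq (n : Int) :
    pvDiviseurs n =
      (PySem.List.pyRange 2 (PySem.Int.floordiv n 2 + 1) 1).filter
        (fun d => decide (PySem.Int.mod n d = 0)) := by
  unfold pvDiviseurs
  apply PySem.List.sorted_eq_of_perm_of_pairwise_lt
  · apply (List.perm_ext_iff_of_nodup ?_ ?_).mpr
    · intro d
      rw [List.mem_filter, PySem.List.mem_pyRange_one,
        pvDivLoop_mem n (PySem.Int.floordiv n 2) d 1 PySem.Set.empty (by omega)]
      simp only [List.not_mem_nil, false_or, decide_eq_true_iff, PySem.Set.empty]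
      rw [pvChar]
      constructor
      · rintro ⟨⟨ha, hb⟩, hc⟩; exact ⟨ha, by omega, hc⟩
      · rintro ⟨ha, hb, hc⟩; exact ⟨⟨ha, by omega⟩, hc⟩
    · exact (PySem.List.nodup_pyRange_one _ _).filter _
    · exact pvDivLoop_nodup n _ 1 PySem.Set.empty (by omega) List.nodup_nil
  · exact (PySem.List.pairwise_lt_pyRange_one _ _).filter _

-- ===== VERDICT (by name: the statement is the Claim_ definition above) =====
theorem compteDiviseurOccurence_spec : Claim_equal_compteDiviseurOccurence := by
  intro listeRepet _
  unfold Spec_compteDiviseurOccurence compteDiviseurOccurence compteDiviseurOccurence_alt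
  congr 1
  apply PySem.List.foldl_congr_mem
  intro contacts nombre _
  rw [PySem.List.foldl_ite_eq_foldl_filter, ← pvDiviseurs_eq]
  apply PySem.List.foldl_congr_mem
  intro c d _
  by_cases hc : c.contains d = false
  · rw [if_pos hc, PySem.Dict.getD_of_not_contains (h := hc)]
    norm_num
  · rw [if_neg hc]
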